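-- pv_equiv track=rewrite | github.com/bdsl/poetry-generation | legacy/poetry-generator2.py | categorise_words
-- ===== SOURCE A (Python) =====
-- from itertools import product
--
-- def get_vowels(pronunciations):
--
--     vowels = [
--         [phoneme for phoneme in phonemes if any(char in ['0', '1', '2'] for char in phoneme)]
--         for phonemes in pronunciations
--     ]
--
--     return vowels
--
-- def get_fit_indices(sequences, profile):
--
--     fits = [
--         all(sequence_step in profile_step for sequence_step, profile_step  in zip(sequence, profile))
--         if len(sequence) <= len(profile) and len(sequence) > 0 else False
--         for sequence in sequences
--     ]
--     fit_indices = [i for i, x in enumerate(fits) if x]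
--
--     return fit_indices
--
-- def categorise_words(pronunciations,
--                      foot,
--                      length):
--
--     vowel_pronunciations = get_vowels(pronunciations)
--
--     def generate_profile(foot, length, i):
--
--         footlength = len(foot)
--         newfoot = foot[i:] + foot[:i]
--         profile = newfoot * (length//footlength) + newfoot[:(length)]
--         next = (i+length)%footlength
--
--         return profile, next
--
--     categories = product(
--         range(len(foot)),
--         range(1, length+1)
--     )
--
--     category_dict = {}
--     for i, wordlength in categories:
--         profile, next = generate_profile(foot, wordlength, i)
--         word_indices = get_fit_indices(vowel_pronunciations, profile)
--         category_dict[(i, wordlength, next)] = word_indices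
--
--     return category_dict
-- ===== SOURCE B (Python) =====
-- def categorise_words(pronunciations, foot, length):
--     accents = {'0', '1', '2'}
--     vowels = [[ph for ph in phs if not accents.isdisjoint(ph)] for phs in pronunciations]
--     F = len(foot)
--     category_dict = {}
--     for i in range(F):
--         rot = foot[i:] + foot[:i]
--         matches = [(j, len(w)) for j, w in enumerate(vowels)
--                    if w and all(ph in rot[k % F] for k, ph in enumerate(w))]
--         for wl in range(1, length + 1):
--             category_dict[(i, wl, (i + wl) % F)] = [j for j, n in matches if n <= wl]
--     return category_dict
-- ===== Notes on version B (the rewrite author's own statement) =====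
-- stated objective: faster
-- what changed: Instead of rebuilding the metrical profile and re-scanning every word for each (rotation, wordlength) category, B matches each word once per rotation against the cyclic repetition of the rotated foot (recording its length) and then forms each category wl by filtering those precomputed matches to words of length at most wl.
-- intended difference: On inputs where some word's accented-phoneme sequence cyclically matches a rotation of the foot and is longer than some category length wl (with len(foot) <= wl <= length) but no longer than A's overshot profile, A includes that word in category wl because it appends newfoot[:length] instead of truncating the profile to wl phonemes, while B includes only words of length at most wl, the intended meaning of a length-wl category (A's own category key continues the metre at (i+wl)%len(foot), which is wrong for a longer word). — e.g. on categorise_words([["AH1", "AH1"]], [["AH1"]], 1): A returns [([0, 1, 0], [0])], B returns [([0, 1, 0], [])]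
import Mathlib
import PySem

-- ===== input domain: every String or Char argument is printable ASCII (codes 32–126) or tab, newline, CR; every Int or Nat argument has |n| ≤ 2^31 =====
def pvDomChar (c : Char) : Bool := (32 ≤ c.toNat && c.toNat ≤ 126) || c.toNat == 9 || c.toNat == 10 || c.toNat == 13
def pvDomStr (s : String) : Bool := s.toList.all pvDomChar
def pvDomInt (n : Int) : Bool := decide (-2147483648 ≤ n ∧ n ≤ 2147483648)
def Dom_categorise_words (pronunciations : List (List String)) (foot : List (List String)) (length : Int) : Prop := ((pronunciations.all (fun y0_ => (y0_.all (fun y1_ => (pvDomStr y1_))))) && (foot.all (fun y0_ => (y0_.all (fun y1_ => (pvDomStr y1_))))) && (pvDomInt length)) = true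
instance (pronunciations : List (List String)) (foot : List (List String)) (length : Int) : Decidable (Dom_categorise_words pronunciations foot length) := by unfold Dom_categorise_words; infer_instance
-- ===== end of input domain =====

-- B precomputes, once per rotation of the foot, which words match the cyclic repetition of the
-- rotated foot (with their lengths), so each (rotation, wordlength) category is a filter by
-- word length; B bounds a category wl by wl itself, which differs from A on the D_ inputs below.

-- ===== PORT A =====
def pvGetVowels (pronunciations : List (List String)) : List (List String) :=
  pronunciations.map (fun phonemes =>
    phonemes.filter (fun phoneme =>
      phoneme.toList.any (fun char => (['0', '1', '2'] : List Char).contains char)))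

def pvGetFitIndices (sequences : List (List String)) (profile : List (List String)) : List Int :=
  let fits := sequences.map (fun sequence =>
    if sequence.length ≤ profile.length && 0 < sequence.length then
      (sequence.zip profile).all (fun st => st.2.contains st.1)
    else false)
  ((PySem.List.enumerate fits).filter (fun p => p.2)).map (fun p => p.1)

def pvGenerateProfile (foot : List (List String)) (length i : Int) : List (List String) × Int :=
  let footlength := PySem.List.len foot
  let newfoot := PySem.List.slice foot (some i) none ++ PySem.List.slice foot none (some i)
  let profile := PySem.List.pyRepeat newfoot (PySem.Int.floordiv length footlength)
                   ++ PySem.List.slice newfoot none (some length)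
  (profile, PySem.Int.mod (i + length) footlength)

def categorise_words (pronunciations : List (List String)) (foot : List (List String)) (length : Int) : List (List Int × List Int) :=
  let vowel_pronunciations := pvGetVowels pronunciations
  let categories := (PySem.List.pyRange 0 (PySem.List.len foot) 1).flatMap (fun i =>
    (PySem.List.pyRange 1 (length + 1) 1).map (fun wordlength => (i, wordlength)))
  (categories.foldl (fun d c =>
      let pr := pvGenerateProfile foot c.2 c.1
      d.insert [c.1, c.2, pr.2] (pvGetFitIndices vowel_pronunciations pr.1))
    PySem.Dict.empty).items

-- ===== PORT B =====
def pvAltVowels (pronunciations : List (List String)) : List (List String) :=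
  pronunciations.map (fun phs =>
    phs.filter (fun ph =>
      !(PySem.Set.isdisjoint (PySem.Set.ofList ['0', '1', '2']) ph.toList)))

def pvRot (foot : List (List String)) (i : Int) : List (List String) :=
  PySem.List.slice foot (some i) none ++ PySem.List.slice foot none (some i)

def pvMatch (F : Int) (rot : List (List String)) (w : List String) : Bool :=
  !w.isEmpty && (PySem.List.enumerate w).all (fun kp =>
    (PySem.List.pyGetD rot (PySem.Int.mod kp.1 F) []).contains kp.2)

def pvInfo (vp : List (List String)) (F : Int) (rot : List (List String)) : List (Int × Int) :=
  (PySem.List.enumerate vp).foldl (fun acc jw =>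
    if pvMatch F rot jw.2 then acc ++ [(jw.1, PySem.List.len jw.2)] else acc) []

def categorise_words_alt (pronunciations : List (List String)) (foot : List (List String)) (length : Int) : List (List Int × List Int) :=
  let vp := pvAltVowels pronunciations
  let F := PySem.List.len foot
  ((PySem.List.pyRange 0 F 1).foldl (fun d i =>
      let rot := pvRot foot i
      let info := pvInfo vp F rot
      (PySem.List.pyRange 1 (length + 1) 1).foldl (fun d wl =>
        d.insert [i, wl, PySem.Int.mod (i + wl) F]
          ((info.filter (fun p => p.2 ≤ wl)).map (fun p => p.1))) d)
    PySem.Dict.empty).items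

-- ===== PRECONDITION & SPEC =====
-- On inputs where some word's accented-phoneme sequence cyclically matches a rotation of the
-- foot and is longer than some category length wl (len(foot) ≤ wl ≤ length) yet no longer than
-- A's overshot profile, A admits that word into category wl because it appends newfoot[:length]
-- instead of truncating the profile to wl phonemes; B admits only words of length ≤ wl, the
-- intended meaning of the category.
def D_categorise_words (pronunciations : List (List String)) (foot : List (List String)) (length : Int) : Prop :=
  (pronunciations.any fun w =>
    decide (foot.length ≤ min length.toNat (w.length - 1)) &&
    let v := w.filter fun phoneme => phoneme.toList.any fun char => (['0', '1', '2'] : List Char).contains char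
    let m := min length.toNat (v.length - 1)
    decide (foot.length ≤ m) && decide (v.length ≤ foot.length * (m / foot.length) + foot.length) &&
    (List.range foot.length).any fun i =>
      (List.range v.length).all fun k =>
        (foot.getD ((i + k) % foot.length) []).contains (v.getD k "")) = true
instance (pronunciations : List (List String)) (foot : List (List String)) (length : Int) : Decidable (D_categorise_words pronunciations foot length) := by unfold D_categorise_words; infer_instance

def Spec_categorise_words (pronunciations : List (List String)) (foot : List (List String)) (length : Int) (out : List (List Int × List Int)) : Prop := ¬ D_categorise_words pronunciations foot length → out = categorise_words_alt pronunciations foot length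
instance (pronunciations : List (List String)) (foot : List (List String)) (length : Int) (out : List (List Int × List Int)) : Decidable (Spec_categorise_words pronunciations foot length out) := by unfold Spec_categorise_words; infer_instance

def pvDiffWitness_categorise_words : List (List String) × List (List String) × Int :=
  ([["AH1", "AH1"]], [["AH1"]], 1)
def pvDiffWitnessOut_categorise_words : (List (List Int × List Int)) × (List (List Int × List Int)) :=
  ([([0, 1, 0], [0])], [([0, 1, 0], [])])

-- ===== CLAIM (what is proved, stated in full; the proofs are below) =====
def Claim_unchanged_categorise_words : Prop := ∀ (pronunciations : List (List String)) (foot : List (List String)) (length : Int), Dom_categorise_words pronunciations foot length → Spec_categorise_words pronunciations foot length (categorise_words pronunciations foot length)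
def Claim_changed_categorise_words : Prop := Dom_categorise_words (pvDiffWitness_categorise_words.1) (pvDiffWitness_categorise_words.2.1) (pvDiffWitness_categorise_words.2.2) ∧ D_categorise_words (pvDiffWitness_categorise_words.1) (pvDiffWitness_categorise_words.2.1) (pvDiffWitness_categorise_words.2.2) ∧ categorise_words (pvDiffWitness_categorise_words.1) (pvDiffWitness_categorise_words.2.1) (pvDiffWitness_categorise_words.2.2) = pvDiffWitnessOut_categorise_words.1 ∧ categorise_words_alt (pvDiffWitness_categorise_words.1) (pvDiffWitness_categorise_words.2.1) (pvDiffWitness_categorise_words.2.2) = pvDiffWitnessOut_categorise_words.2 ∧ pvDiffWitnessOut_categorise_words.1 ≠ pvDiffWitnessOut_categorise_words.2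
def Claim_exact_categorise_words : Prop := ∀ (pronunciations : List (List String)) (foot : List (List String)) (length : Int), Dom_categorise_words pronunciations foot length → D_categorise_words pronunciations foot length → categorise_words pronunciations foot length ≠ categorise_words_alt pronunciations foot length

-- ===== LEMMAS AND PROOFS =====

-- A's profile length, as a closed form (proof-side helper only)
def pvBound (F wl : Int) : Int := F * PySem.Int.floordiv wl F + min wl F

-- the two vowel extractions agree
lemma pv_vowel_pred (ph : String) :
    (!(PySem.Set.isdisjoint (PySem.Set.ofList ['0', '1', '2']) ph.toList))
      = ph.toList.any (fun char => (['0', '1', '2'] : List Char).contains char) := by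
  have hset : PySem.Set.ofList ['0', '1', '2'] = (['0', '1', '2'] : List Char) := by decide
  rw [hset]
  have hiff := PySem.Set.isdisjoint_iff (['0', '1', '2'] : List Char) ph.toList
  cases hd : PySem.Set.isdisjoint (['0', '1', '2'] : List Char) ph.toList with
  | true =>
    have hfa := hiff.mp hd
    simp only [Bool.not_true]
    symm
    rw [List.any_eq_false]
    intro c hc
    by_contra hcc
    have hmem : c ∈ (['0', '1', '2'] : List Char) := by simpa using hcc
    exact hfa c hmem hc
  | false =>
    have hnp : ¬ ∀ x ∈ (['0', '1', '2'] : List Char), x ∉ ph.toList := by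
      intro hp
      rw [hiff.mpr hp] at hd
      simp at hd
    push Not at hnp
    obtain ⟨c, hcl, hcp⟩ := hnp
    simp only [Bool.not_false]
    symm
    rw [List.any_eq_true]
    exact ⟨c, hcp, by simpa using hcl⟩

lemma pv_vowels_eq (pronunciations : List (List String)) :
    pvAltVowels pronunciations = pvGetVowels pronunciations := by
  unfold pvAltVowels pvGetVowels
  refine List.map_congr_left (fun phs _ => ?_)
  exact List.filter_congr (fun ph _ => pv_vowel_pred ph)

-- enumerate of a mapped list
lemma pv_enumerate_map {a b : Type} (f : a → b) (xs : List a) (s : Int) :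
    PySem.List.enumerate (xs.map f) s = (PySem.List.enumerate xs s).map (fun p => (p.1, f p.2)) := by
  induction xs generalizing s with
  | nil => simp [PySem.List.enumerate_nil]
  | cons x t ih => simp [PySem.List.enumerate_cons, ih]

-- indexing into the cyclic repetition of the rotated foot
lemma pv_rep_get {a : Type} (rot : List a) (q m k : Nat)
    (hk : k < q * rot.length + min m rot.length) :
    ((List.replicate q rot).flatten ++ rot.take m)[k]? = rot[k % rot.length]? := by
  induction q generalizing k with
  | zero =>
    simp only [Nat.zero_mul, Nat.zero_add] at hk
    have hkm : k < m := lt_of_lt_of_le hk (Nat.min_le_left _ _)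
    have hkl : k < rot.length := lt_of_lt_of_le hk (Nat.min_le_right _ _)
    rw [Nat.mod_eq_of_lt hkl]
    simp [hkm]
  | succ q ih =>
    have hrep : (List.replicate (q + 1) rot).flatten = rot ++ (List.replicate q rot).flatten := by
      simp [List.replicate_succ]
    rw [hrep, List.append_assoc]
    by_cases hlt : k < rot.length
    · rw [List.getElem?_append_left hlt, Nat.mod_eq_of_lt hlt]
    · rw [Nat.not_lt] at hlt
      have hq : (q + 1) * rot.length = q * rot.length + rot.length := by ring
      rw [List.getElem?_append_right hlt, ih (k - rot.length) (by omega),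
        Nat.mod_eq_sub_mod hlt]

lemma pv_rot_length (foot : List (List String)) (i : Int) (h0 : 0 ≤ i)
    (hF : i < (foot.length : Int)) : (pvRot foot i).length = foot.length := by
  unfold pvRot
  rw [PySem.List.slice_from foot h0, PySem.List.slice_to foot h0]
  simp
  omega

lemma pv_profile_eq (foot : List (List String)) (i : Int) (wn : Nat) :
    (pvGenerateProfile foot (wn : Int) i).1
      = (List.replicate (wn / foot.length) (pvRot foot i)).flatten ++ (pvRot foot i).take wn := by
  unfold pvGenerateProfile pvRot
  simp only [PySem.List.len_eq]
  rw [PySem.Int.floordiv_natCast, PySem.List.slice_to _ (Int.natCast_nonneg wn)]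
  simp only [PySem.List.pyRepeat, Int.toNat_natCast]

lemma pv_profile_length (foot : List (List String)) (i : Int) (wn : Nat) (h0 : 0 ≤ i)
    (hF : i < (foot.length : Int)) :
    (pvGenerateProfile foot (wn : Int) i).1.length
      = (wn / foot.length) * foot.length + min wn foot.length := by
  rw [pv_profile_eq foot i wn]
  have hrl := pv_rot_length foot i h0 hF
  simp [List.length_flatten, hrl, List.map_replicate, List.sum_replicate, smul_eq_mul]

lemma pv_bound_eq (foot : List (List String)) (i : Int) (wn : Nat) (h0 : 0 ≤ i)
    (hF : i < (foot.length : Int)) :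
    pvBound ((foot.length : Int)) (wn : Int) = ((pvGenerateProfile foot (wn : Int) i).1.length : Int) := by
  rw [pv_profile_length foot i wn h0 hF]
  unfold pvBound
  rw [PySem.Int.floordiv_natCast]
  push_cast [Nat.cast_min]
  ring

-- A's per-word fit test equals B's cyclic-match test plus A's profile-length bound
lemma pv_fit (foot : List (List String)) (w : List String) (i : Int) (wn : Nat)
    (h0 : 0 ≤ i) (hF : i < (foot.length : Int)) :
    (if w.length ≤ (pvGenerateProfile foot (wn : Int) i).1.length && 0 < w.length then
       (w.zip (pvGenerateProfile foot (wn : Int) i).1).all (fun st => st.2.contains st.1)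
     else false)
      = (pvMatch ((foot.length : Int)) (pvRot foot i) w
          && decide ((PySem.List.len w) ≤ pvBound ((foot.length : Int)) (wn : Int))) := by
  have hFn : 0 < foot.length := by omega
  have hrl := pv_rot_length foot i h0 hF
  rw [pv_bound_eq foot i wn h0 hF]
  simp only [PySem.List.len_eq, Nat.cast_le]
  by_cases hpos : 0 < w.length
  · by_cases hle : w.length ≤ (pvGenerateProfile foot (wn : Int) i).1.length
    · simp only [hle, hpos, decide_true, Bool.and_self, if_true, Bool.and_true]
      unfold pvMatch
      have hne : w.isEmpty = false := by
        cases w with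
        | nil => simp at hpos
        | cons x t => rfl
      rw [hne]
      simp only [Bool.not_false, Bool.true_and]
      have hplen := pv_profile_length foot i wn h0 hF
      have hmlt : ∀ kk : Nat, kk % foot.length < (pvRot foot i).length := by
        intro kk
        rw [hrl]
        exact Nat.mod_lt _ hFn
      have hprofget : ∀ (kk : Nat), kk < w.length →
          (pvGenerateProfile foot (wn : Int) i).1[kk]? = (pvRot foot i)[kk % foot.length]? := by
        intro kk hkk
        rw [pv_profile_eq foot i wn]
        have h2 := pv_rep_get (pvRot foot i) (wn / foot.length) wn kk
          (by rw [hrl]; rw [hplen] at hle; omega)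
        rwa [hrl] at h2
      have hzlen : (w.zip (pvGenerateProfile foot (wn : Int) i).1).length = w.length := by
        rw [List.length_zip]
        omega
      rw [Bool.eq_iff_iff]
      simp only [List.all_eq_true]
      constructor
      · intro h kp hkp
        rw [PySem.List.mem_enumerate_iff] at hkp
        obtain ⟨kk, hkk, rfl⟩ := hkp
        simp only [zero_add]
        rw [PySem.Int.mod_natCast, PySem.List.pyGetD_natCast,
          List.getD_eq_getElem _ _ (hmlt kk)]
        have h1 := hprofget kk hkk
        rw [List.getElem?_eq_getElem (lt_of_lt_of_le hkk hle),
          List.getElem?_eq_getElem (hmlt kk)] at h1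
        have h2 := Option.some.inj h1
        have hz : ((w[kk]'hkk, (pvGenerateProfile foot (wn : Int) i).1[kk]'(lt_of_lt_of_le hkk hle)))
            ∈ w.zip (pvGenerateProfile foot (wn : Int) i).1 := by
          rw [List.mem_iff_getElem]
          exact ⟨kk, by rw [hzlen]; exact hkk, List.getElem_zip⟩
        have h3 := h _ hz
        rw [← h2]
        exact h3
      · intro h st hst
        rw [List.mem_iff_getElem] at hst
        obtain ⟨kk, hkz, rfl⟩ := hst
        simp only [List.getElem_zip]
        have hkk : kk < w.length := by rw [hzlen] at hkz; exact hkz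
        have h1 := hprofget kk hkk
        rw [List.getElem?_eq_getElem (lt_of_lt_of_le hkk hle),
          List.getElem?_eq_getElem (hmlt kk)] at h1
        have h2 := Option.some.inj h1
        have h3 := h ((0 : Int) + (kk : Int), w[kk]'hkk)
          ((PySem.List.mem_enumerate_iff w 0 _).mpr ⟨kk, hkk, rfl⟩)
        simp only [zero_add] at h3
        rw [PySem.Int.mod_natCast, PySem.List.pyGetD_natCast,
          List.getD_eq_getElem _ _ (hmlt kk)] at h3
        rw [h2]
        exact h3
    · simp [hle, hpos]
  · have hw : w = [] := by
      cases w with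
      | nil => rfl
      | cons x t => simp at hpos
    subst hw
    simp [pvMatch]

-- B's info loop as a filter-and-map
lemma pv_info_eq (vp : List (List String)) (F : Int) (rot : List (List String)) :
    pvInfo vp F rot
      = ((PySem.List.enumerate vp).filter (fun jw => pvMatch F rot jw.2)).map
          (fun jw => (jw.1, PySem.List.len jw.2)) := by
  unfold pvInfo
  rw [PySem.List.foldl_append_if]
  simp

-- indexing the rotation = indexing the foot cyclically
lemma pv_rot_getD {a : Type} (l : List a) (d : a) (iN m : Nat)
    (hi : iN < l.length) (hm : m < l.length) :
    (l.drop iN ++ l.take iN).getD m d = l.getD ((iN + m) % l.length) d := by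
  by_cases hc : m < l.length - iN
  · have h1 : m < (l.drop iN).length := by simp; omega
    have h2 : iN + m < l.length := by omega
    rw [List.getD, List.getElem?_append_left h1, List.getElem?_drop,
      List.getD, Nat.mod_eq_of_lt h2]
  · have h1 : (l.drop iN).length ≤ m := by simp; omega
    have h2 : m - (l.length - iN) < iN := by omega
    have hmod : (iN + m) % l.length = m - (l.length - iN) := by
      have : iN + m - l.length < l.length := by omega
      rw [Nat.mod_eq_sub_mod (by omega), Nat.mod_eq_of_lt this]
      omega
    rw [List.getD, List.getElem?_append_right h1, List.getD, hmod]
    congr 1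
    rw [List.getElem?_take]
    simp [h2]

-- B's cyclic test equals D_'s match condition
lemma pv_match_iff (foot : List (List String)) (w : List String) (i : Int)
    (h0 : 0 ≤ i) (hF : i < (foot.length : Int)) (hne : w ≠ []) :
    pvMatch ((foot.length : Int)) (pvRot foot i) w
      = (List.range w.length).all (fun k =>
          (foot.getD ((i.toNat + k) % foot.length) ([] : List String)).contains (w.getD k "")) := by
  have hFn : 0 < foot.length := by omega
  unfold pvMatch
  have hie : w.isEmpty = false := by
    cases w with
    | nil => exact absurd rfl hne
    | cons x t => rfl
  rw [hie]
  simp only [Bool.not_false, Bool.true_and]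
  have hrot : pvRot foot i = foot.drop i.toNat ++ foot.take i.toNat := by
    unfold pvRot
    rw [PySem.List.slice_from foot h0, PySem.List.slice_to foot h0]
  rw [Bool.eq_iff_iff]
  simp only [List.all_eq_true]
  constructor
  · intro h k hk
    rw [List.mem_range] at hk
    have h3 := h ((0 : Int) + (k : Int), w[k]'hk)
      ((PySem.List.mem_enumerate_iff w 0 _).mpr ⟨k, hk, rfl⟩)
    simp only [zero_add] at h3
    rw [PySem.Int.mod_natCast, PySem.List.pyGetD_natCast, hrot,
      pv_rot_getD foot ([] : List String) i.toNat (k % foot.length) (by omega) (Nat.mod_lt _ hFn),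
      Nat.add_mod_mod] at h3
    rw [List.getD_eq_getElem w "" hk]
    exact h3
  · intro h kp hkp
    rw [PySem.List.mem_enumerate_iff] at hkp
    obtain ⟨k, hk, rfl⟩ := hkp
    have h3 := h k (List.mem_range.mpr hk)
    rw [List.getD_eq_getElem w "" hk] at h3
    simp only [zero_add]
    rw [PySem.Int.mod_natCast, PySem.List.pyGetD_natCast, hrot,
      pv_rot_getD foot ([] : List String) i.toNat (k % foot.length) (by omega) (Nat.mod_lt _ hFn),
      Nat.add_mod_mod]
    exact h3

-- Nat form of A's profile-length bound
lemma pv_boundN (Fn wn : Nat) (_hFn : 0 < Fn) :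
    pvBound ((Fn : Int)) ((wn : Int)) = ((Fn * (wn / Fn) + min wn Fn : Nat) : Int) := by
  unfold pvBound
  rw [PySem.Int.floordiv_natCast]
  push_cast [Nat.cast_min]
  ring

-- under ¬D_, A's overshot bound and B's bound wl filter the same matches
lemma pv_bound_filter (pronunciations foot : List (List String)) (length : Int)
    (hnd : ¬ D_categorise_words pronunciations foot length) (i : Int) (wn : Nat)
    (h0 : 0 ≤ i) (hF : i < (foot.length : Int)) (_h1 : 1 ≤ ((wn : Nat) : Int)) (h2 : ((wn : Nat) : Int) ≤ length) :
    (pvInfo (pvGetVowels pronunciations) ((foot.length : Int)) (pvRot foot i)).filter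
        (fun p => p.2 ≤ pvBound ((foot.length : Int)) ((wn : Nat) : Int))
      = (pvInfo (pvGetVowels pronunciations) ((foot.length : Int)) (pvRot foot i)).filter
        (fun p => p.2 ≤ ((wn : Nat) : Int)) := by
  have hFn : 0 < foot.length := by omega
  refine List.filter_congr (fun p hp => ?_)
  rw [pv_info_eq, List.mem_map] at hp
  obtain ⟨jw, hjw, rfl⟩ := hp
  rw [List.mem_filter] at hjw
  obtain ⟨hjmem, hjmatch⟩ := hjw
  rw [PySem.List.mem_enumerate_iff] at hjmem
  obtain ⟨jj, hjj, rfl⟩ := hjmem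
  set w := (pvGetVowels pronunciations)[jj] with hw
  simp only [PySem.List.len_eq]
  rw [pv_boundN foot.length wn hFn]
  simp only [Nat.cast_le]
  rw [decide_eq_decide]
  set n := w.length with hn
  have hwn_le_bound : wn ≤ foot.length * (wn / foot.length) + min wn foot.length := by
    have hdm := Nat.div_add_mod wn foot.length
    have hml := Nat.mod_lt wn hFn
    have hmle := Nat.mod_le wn foot.length
    omega
  constructor
  · intro hb
    by_contra hgt
    rw [Nat.not_le] at hgt
    -- wn < n ≤ A's bound: this is exactly a D_ input, contradicting hnd
    have hFw : foot.length ≤ wn := by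
      by_contra hlt
      rw [Nat.not_le] at hlt
      rw [Nat.div_eq_of_lt hlt] at hb
      omega
    have hb' : n ≤ foot.length * (wn / foot.length) + foot.length := by
      have : min wn foot.length = foot.length := by omega
      omega
    exfalso
    apply hnd
    unfold D_categorise_words
    have hjlen : jj < pronunciations.length := by
      simpa [pvGetVowels] using hjj
    rw [List.any_eq_true]
    refine ⟨pronunciations[jj], List.getElem_mem hjlen, ?_⟩
    have hwval : (pronunciations[jj].filter fun phoneme =>
        phoneme.toList.any fun char => (['0', '1', '2'] : List Char).contains char) = w := by
      simp [hw, pvGetVowels]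
    have hlenle : w.length ≤ pronunciations[jj].length := by
      rw [← hwval]; exact List.length_filter_le _ _
    rw [Bool.and_eq_true]
    refine ⟨by simp only [decide_eq_true_eq]; omega, ?_⟩
    simp only [hwval]
    rw [← hn]
    have hwnle : wn ≤ min length.toNat (n - 1) := by omega
    have hdiv : foot.length * (wn / foot.length) ≤
        foot.length * (min length.toNat (n - 1) / foot.length) :=
      Nat.mul_le_mul_left _ (Nat.div_le_div_right hwnle)
    rw [Bool.and_eq_true, Bool.and_eq_true]
    refine ⟨⟨by simp only [decide_eq_true_eq]; omega, by simp only [decide_eq_true_eq]; omega⟩, ?_⟩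
    rw [List.any_eq_true]
    refine ⟨i.toNat, List.mem_range.mpr (by omega), ?_⟩
    have hne : w ≠ [] := by
      intro hE
      rw [hE] at hn
      simp at hn
      omega
    rw [← pv_match_iff foot w i h0 hF hne]
    exact hjmatch
  · intro hle
    omega

-- the per-category values agree (with A's own bound)
lemma pv_val (vp : List (List String)) (foot : List (List String)) (i : Int) (wn : Nat)
    (h0 : 0 ≤ i) (hF : i < (foot.length : Int)) :
    pvGetFitIndices vp (pvGenerateProfile foot (wn : Int) i).1
      = ((pvInfo vp ((foot.length : Int)) (pvRot foot i)).filter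
            (fun p => p.2 ≤ pvBound ((foot.length : Int)) (wn : Int))).map (fun p => p.1) := by
  unfold pvGetFitIndices
  dsimp only
  rw [pv_info_eq, pv_enumerate_map, List.filter_map, List.filter_map, List.filter_filter,
    List.map_map, List.map_map]
  simp only [Function.comp_def]
  refine congrArg _ (List.filter_congr (fun jw _ => ?_))
  exact (pv_fit foot jw.2 i wn h0 hF).trans (Bool.and_comm _ _)

-- a nested loop of insertions at fresh distinct keys appends its items
lemma pv_items_nested (v : Int → Int → List Int) (g : Int → Int → Int) (inner : List Int)
    (hinner : inner.Nodup) :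
    ∀ (outer : List Int) (d : PySem.Dict (List Int) (List Int)), outer.Nodup →
      (∀ kk ∈ d.keys, ∀ i ∈ outer, kk.head? ≠ some i) →
      (outer.foldl (fun d i =>
          inner.foldl (fun d wl => d.insert [i, wl, g i wl] (v i wl)) d) d).items
        = d.items ++ outer.flatMap (fun i => inner.map (fun wl => ([i, wl, g i wl], v i wl))) := by
  intro outer
  induction outer with
  | nil => intro d _ _; simp
  | cons i rest ih =>
    intro d houter hd
    simp only [List.foldl_cons, List.flatMap_cons]
    have hinj : Function.Injective (fun wl => ([i, wl, g i wl] : List Int)) := by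
      intro a b hab
      simp only [List.cons.injEq, and_true] at hab
      exact hab.2.1
    have hfresh : ∀ wl ∈ inner, d.contains [i, wl, g i wl] = false := by
      intro wl _
      rw [PySem.Dict.contains_eq_decide_mem_keys]
      simp only [decide_eq_false_iff_not]
      intro hmem
      exact hd _ hmem i List.mem_cons_self rfl
    have hin := PySem.Dict.items_foldl_insert_fresh inner
      (fun wl => ([i, wl, g i wl] : List Int)) (fun wl => v i wl) d hfresh (hinner.map hinj)
    have hkeys : (inner.foldl (fun d wl => d.insert [i, wl, g i wl] (v i wl)) d).keys
        = d.keys ++ inner.map (fun wl => ([i, wl, g i wl] : List Int)) := by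
      simp only [PySem.Dict.keys, hin, List.map_append, List.map_map, Function.comp_def]
    rw [ih _ houter.of_cons ?_]
    · rw [hin]
      simp [List.append_assoc]
    · intro kk hkk i' hi'
      rw [hkeys, List.mem_append] at hkk
      rcases hkk with hold | hnew
      · exact hd _ hold i' (List.mem_cons_of_mem _ hi')
      · obtain ⟨wl, _, rfl⟩ := List.mem_map.mp hnew
        intro hii
        simp only [List.head?_cons, Option.some.injEq] at hii
        subst hii
        exact (List.nodup_cons.mp houter).1 hi'

-- a flat fold over a flatMap is the nested fold
lemma pv_foldl_flatMap {a b c : Type} (l : List a) (g : a → List b) (f : c → b → c) (init : c) :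
    (l.flatMap g).foldl f init = l.foldl (fun acc x => (g x).foldl f acc) init := by
  induction l generalizing init with
  | nil => rfl
  | cons x t ih => simp [List.foldl_append, ih]

-- both ports as explicit tables over the same (rotation, wordlength) grid
lemma pv_A_eq (pronunciations foot : List (List String)) (length : Int) :
    categorise_words pronunciations foot length
      = (PySem.List.pyRange 0 (foot.length : Int) 1).flatMap (fun i =>
          (PySem.List.pyRange 1 (length + 1) 1).map (fun wl =>
            ([i, wl, PySem.Int.mod (i + wl) (foot.length : Int)],
             pvGetFitIndices (pvGetVowels pronunciations) (pvGenerateProfile foot wl i).1))) := by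
  unfold categorise_words
  dsimp only
  simp only [PySem.List.len_eq]
  rw [pv_foldl_flatMap]
  simp only [List.foldl_map]
  rw [pv_items_nested
      (fun i wl => pvGetFitIndices (pvGetVowels pronunciations) (pvGenerateProfile foot wl i).1)
      (fun i wl => (pvGenerateProfile foot wl i).2) (PySem.List.pyRange 1 (length + 1) 1)
      (PySem.List.nodup_pyRange_one _ _) (PySem.List.pyRange 0 (foot.length : Int) 1)
      PySem.Dict.empty (PySem.List.nodup_pyRange_one _ _)
      (by intro kk hkk _ _; simp [PySem.Dict.empty, PySem.Dict.keys] at hkk)]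
  have hemp : (PySem.Dict.empty : PySem.Dict (List Int) (List Int)).items = [] := rfl
  rw [hemp, List.nil_append, List.flatMap_def, List.flatMap_def]
  refine congrArg List.flatten (List.map_congr_left (fun i _ => ?_))
  refine List.map_congr_left (fun wl _ => ?_)
  simp [pvGenerateProfile, PySem.List.len_eq]

lemma pv_B_eq (pronunciations foot : List (List String)) (length : Int) :
    categorise_words_alt pronunciations foot length
      = (PySem.List.pyRange 0 (foot.length : Int) 1).flatMap (fun i =>
          (PySem.List.pyRange 1 (length + 1) 1).map (fun wl =>
            ([i, wl, PySem.Int.mod (i + wl) (foot.length : Int)],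
             ((pvInfo (pvAltVowels pronunciations) ((foot.length : Int)) (pvRot foot i)).filter
                (fun p => p.2 ≤ wl)).map (fun p => p.1)))) := by
  unfold categorise_words_alt
  dsimp only
  simp only [PySem.List.len_eq]
  refine Eq.trans (pv_items_nested
      (fun i wl => ((pvInfo (pvAltVowels pronunciations) ((foot.length : Int)) (pvRot foot i)).filter
          (fun p => p.2 ≤ wl)).map (fun p => p.1))
      (fun i wl => PySem.Int.mod (i + wl) (foot.length : Int)) (PySem.List.pyRange 1 (length + 1) 1)
      (PySem.List.nodup_pyRange_one _ _) (PySem.List.pyRange 0 (foot.length : Int) 1)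
      PySem.Dict.empty (PySem.List.nodup_pyRange_one _ _)
      (by intro kk hkk _ _; simp [PySem.Dict.empty, PySem.Dict.keys] at hkk)) ?_
  have hemp : (PySem.Dict.empty : PySem.Dict (List Int) (List Int)).items = [] := rfl
  rw [hemp, List.nil_append]

-- equal flatMaps over the same spine have equal blocks
lemma pv_flatMap_inj {α β : Type} (outer : List α) (f g : α → List β)
    (hlen : ∀ i, (f i).length = (g i).length)
    (h : outer.flatMap f = outer.flatMap g) : ∀ i ∈ outer, f i = g i := by
  induction outer with
  | nil => intro i hi; cases hi
  | cons a t ih =>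
    intro i hi
    rw [List.flatMap_cons, List.flatMap_cons] at h
    obtain ⟨h1, h2⟩ := List.append_inj h (hlen a)
    rcases List.mem_cons.mp hi with rfl | hit
    · exact h1
    · exact ih h2 i hit

lemma pv_map_inj {α β : Type} (l : List α) (f g : α → β) (h : l.map f = l.map g) :
    ∀ x ∈ l, f x = g x := by
  induction l with
  | nil => intro x hx; cases hx
  | cons a t ih =>
    intro x hx
    simp only [List.map_cons, List.cons.injEq] at h
    rcases List.mem_cons.mp hx with rfl | hxt
    · exact h.1
    · exact ih h.2 x hxt

-- a strictly weaker filter keeps strictly more elements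
lemma pv_filter_le {α : Type} (l : List α) (p q : α → Bool)
    (himp : ∀ x, q x = true → p x = true) :
    (l.filter q).length ≤ (l.filter p).length := by
  induction l with
  | nil => simp
  | cons a t ih =>
    by_cases hqa : q a = true
    · simp [List.filter_cons, hqa, himp a hqa]
      omega
    · rw [List.filter_cons, if_neg (by simp [hqa])]
      rw [List.filter_cons]
      split
      · simp
        omega
      · exact ih

lemma pv_filter_lt {α : Type} (l : List α) (p q : α → Bool)
    (himp : ∀ x, q x = true → p x = true)
    (x : α) (hx : x ∈ l) (hp : p x = true) (hq : q x = false) :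
    (l.filter q).length < (l.filter p).length := by
  induction l with
  | nil => cases hx
  | cons a t ih =>
    rcases List.mem_cons.mp hx with rfl | hxt
    · rw [List.filter_cons, if_neg (by simp [hq]), List.filter_cons, if_pos (by simp [hp])]
      have := pv_filter_le t p q himp
      simp
      omega
    · have hlt := ih hxt
      by_cases hqa : q a = true
      · rw [List.filter_cons, if_pos (by simp [hqa]), List.filter_cons,
          if_pos (by simp [himp a hqa])]
        simp
        omega
      · rw [List.filter_cons, if_neg (by simp [hqa]), List.filter_cons]
        split
        · simp
          omega
        · exact hlt

-- ===== VERDICT (by name: the statements are the Claim_ definitions above) =====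
theorem categorise_words_spec : Claim_unchanged_categorise_words := by
  intro pronunciations foot length _
  unfold Spec_categorise_words
  intro hnd
  rw [pv_A_eq, pv_B_eq, pv_vowels_eq, List.flatMap_def, List.flatMap_def]
  refine congrArg List.flatten (List.map_congr_left (fun i hi => ?_))
  simp only [PySem.List.mem_pyRange_one] at hi
  refine List.map_congr_left (fun wl hwl => ?_)
  simp only [PySem.List.mem_pyRange_one] at hwl
  obtain ⟨wn, rfl⟩ : ∃ n : Nat, wl = (n : Int) :=
    ⟨wl.toNat, (Int.toNat_of_nonneg (by omega)).symm⟩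
  rw [pv_val (pvGetVowels pronunciations) foot i wn hi.1 hi.2,
    pv_bound_filter pronunciations foot length hnd i wn hi.1 hi.2 (by omega) (by omega)]

theorem categorise_words_changed : Claim_changed_categorise_words := by
  unfold Claim_changed_categorise_words; decide

theorem categorise_words_tight : Claim_exact_categorise_words := by
  intro pronunciations foot length _ hD heq
  unfold D_categorise_words at hD
  rw [List.any_eq_true] at hD
  obtain ⟨w0, hw0, hbody⟩ := hD
  simp only [Bool.and_eq_true, decide_eq_true_eq, List.any_eq_true, List.all_eq_true,
    List.mem_range] at hbody
  obtain ⟨-, ⟨hFm, hnb⟩, i0, hi0, hmatch⟩ := hbody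
  set v := w0.filter (fun phoneme =>
    phoneme.toList.any fun char => (['0', '1', '2'] : List Char).contains char) with hv
  set n := v.length with hnn
  have hFpos : 0 < foot.length := by omega
  have hnge : foot.length + 1 ≤ n := by omega
  obtain ⟨jj, hjj, hjjval⟩ := List.mem_iff_getElem.mp hw0
  rw [pv_A_eq, pv_B_eq, pv_vowels_eq] at heq
  have hcols := pv_flatMap_inj (PySem.List.pyRange 0 (foot.length : Int) 1) _ _
    (fun i => by simp) heq (i0 : Int)
    (PySem.List.mem_pyRange_one.mpr ⟨by omega, by omega⟩)
  set m := min length.toNat (n - 1) with hm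
  have hmmem : ((m : Nat) : Int) ∈ PySem.List.pyRange 1 (length + 1) 1 :=
    PySem.List.mem_pyRange_one.mpr ⟨by omega, by omega⟩
  have hpair := pv_map_inj _ _ _ hcols ((m : Nat) : Int) hmmem
  have hval : pvGetFitIndices (pvGetVowels pronunciations)
      (pvGenerateProfile foot ((m : Nat) : Int) ((i0 : Nat) : Int)).1
      = ((pvInfo (pvGetVowels pronunciations) ((foot.length : Int))
            (pvRot foot ((i0 : Nat) : Int))).filter
          (fun p => p.2 ≤ ((m : Nat) : Int))).map (fun p => p.1) := congrArg Prod.snd hpair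
  rw [pv_val (pvGetVowels pronunciations) foot ((i0 : Nat) : Int) m (by omega) (by omega)] at hval
  have hjjvp : jj < (pvGetVowels pronunciations).length := by
    simpa [pvGetVowels] using hjj
  have hvpj : (pvGetVowels pronunciations)[jj]'hjjvp = v := by
    simp [pvGetVowels, hv, hjjval]
  have hne : v ≠ [] := by
    intro hE
    rw [hE] at hnn
    simp at hnn
    omega
  have hmatchB : pvMatch ((foot.length : Int)) (pvRot foot ((i0 : Nat) : Int)) v = true := by
    rw [pv_match_iff foot v ((i0 : Nat) : Int) (by omega) (by omega) hne]
    rw [List.all_eq_true]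
    intro k hk
    rw [List.mem_range] at hk
    have h3 := hmatch k (by omega)
    simpa using h3
  have hentry : ((jj : Int), (n : Int)) ∈ pvInfo (pvGetVowels pronunciations)
      ((foot.length : Int)) (pvRot foot ((i0 : Nat) : Int)) := by
    rw [pv_info_eq]
    refine List.mem_map.mpr ⟨((0 : Int) + (jj : Int), v), List.mem_filter.mpr ⟨?_, hmatchB⟩, ?_⟩
    · exact (PySem.List.mem_enumerate_iff _ 0 _).mpr ⟨jj, hjjvp, by rw [hvpj]⟩
    · simp [PySem.List.len_eq, hnn]
  have hlt := pv_filter_lt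
    (pvInfo (pvGetVowels pronunciations) ((foot.length : Int)) (pvRot foot ((i0 : Nat) : Int)))
    (fun p => decide (p.2 ≤ pvBound ((foot.length : Int)) ((m : Nat) : Int)))
    (fun p => decide (p.2 ≤ ((m : Nat) : Int)))
    (by
      intro p hp
      simp only [decide_eq_true_eq] at *
      rw [pv_boundN foot.length m hFpos]
      have hdm := Nat.div_add_mod m foot.length
      have hml := Nat.mod_lt m hFpos
      omega)
    ((jj : Int), (n : Int)) hentry
    (by
      simp only [decide_eq_true_eq]
      rw [pv_boundN foot.length m hFpos]
      have : min m foot.length = foot.length := by omega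
      have hdm := Nat.div_add_mod m foot.length
      simp only [Nat.cast_le]
      omega)
    (by
      simp only [decide_eq_false_iff_not, not_le, Nat.cast_lt]
      omega)
  have hlens := congrArg List.length hval
  simp only [List.length_map] at hlens
  omega
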